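-- pv_equiv track=rewrite | github.com/wingsthy/data_structure | offer/btjump.py | btjumpFloor
-- ===== SOURCE A (Python) =====
-- def btjumpFloor(number):
--     ans=[]
--     ans.append(0)
--     ans.append(1)
--     ans.append(2)
--     for i in range(3, number+1):
--         sum = 1
--         for j in range(1, i):
--             sum += ans[j]
--         ans.append(sum)
--     return ans[number]
-- ===== SOURCE B (Python) =====
-- def btjumpFloor(number):
--     # closed form: f(0)=0, f(n)=2**(n-1) for n>=1
--     if number == 0:
--         return 0
--     return 1 << (number - 1)
-- ===== Notes on version B (the rewrite author's own statement) =====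
-- stated objective: faster
-- what changed: Replaced the quadratic table-building double loop by the closed form f(0)=0, f(n)=2^(n-1) (a single shift).
-- outside the precondition, e.g. on btjumpFloor(-1): A returns 2, B raises ValueError; on btjumpFloor(-2): A returns 1, B raises ValueError; on btjumpFloor(-3): A returns 0, B raises ValueError
import Mathlib
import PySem

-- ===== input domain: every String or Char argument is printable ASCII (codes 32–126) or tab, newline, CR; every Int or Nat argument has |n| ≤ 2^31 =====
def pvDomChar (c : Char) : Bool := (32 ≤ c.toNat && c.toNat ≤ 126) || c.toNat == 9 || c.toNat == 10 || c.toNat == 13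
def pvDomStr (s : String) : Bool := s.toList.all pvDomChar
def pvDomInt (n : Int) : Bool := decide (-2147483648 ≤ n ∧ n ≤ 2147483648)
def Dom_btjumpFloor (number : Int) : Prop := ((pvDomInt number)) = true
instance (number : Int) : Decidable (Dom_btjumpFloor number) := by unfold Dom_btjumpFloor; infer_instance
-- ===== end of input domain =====

-- B replaces A's quadratic table-building double loop by the closed form f(0)=0, f(n)=2^(n-1) (one shift); asymptotically faster.


-- ===== PORT A =====
-- loop body: ans.append(1 + sum(ans[j] for j in range(1, i)))
-- (inside the loop ans[j] for 1 ≤ j < i is always in range, so pyGetD with default 0 is exact there)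
def btjumpFloorStep (ans : List Int) (i : Int) : List Int :=
  ans ++ [(PySem.List.pyRange 1 i 1).foldl (fun s j => s + PySem.List.pyGetD ans j 0) 1]

def btjumpFloor (number : Int) : Int :=
  let ans : List Int := [0, 1, 2]
  let ans := (PySem.List.pyRange 3 (number + 1) 1).foldl btjumpFloorStep ans
  PySem.List.pyGetD ans number 0   -- final ans[number]: in range on Pre_ (Python raises IndexError for number ≤ -4)

-- ===== PORT B =====
def btjumpFloor_alt (number : Int) : Int :=
  if number = 0 then 0 else 2 ^ (number - 1).toNat   -- 1 << (number - 1); Python raises on a negative shift, excluded by Pre_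

-- ===== PRECONDITION & SPEC =====
-- Pre_ restricts to the natural domain (non-negative floor counts): for number ≤ -4 A raises IndexError, and for
-- -3 ≤ number ≤ -1 A returns accidental negative-index wraparound values (0, 1, 2) while B raises ValueError there.
def Pre_btjumpFloor (number : Int) : Prop := 0 ≤ number
instance (number : Int) : Decidable (Pre_btjumpFloor number) := by unfold Pre_btjumpFloor; infer_instance
def pvWitness_btjumpFloor : Int := 5

def Spec_btjumpFloor (number : Int) (out : Int) : Prop := out = btjumpFloor_alt number
instance (number : Int) (out : Int) : Decidable (Spec_btjumpFloor number out) := by unfold Spec_btjumpFloor; infer_instance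

-- ===== CLAIM (what is proved, stated in full; the proofs are below) =====
def Claim_equal_btjumpFloor : Prop := ∀ (number : Int), Dom_btjumpFloor number → Pre_btjumpFloor number → Spec_btjumpFloor number (btjumpFloor number)

-- ===== LEMMAS AND PROOFS =====

-- sum of the geometric series 1, 2, 4, …, 2^(n-1)
theorem pvGeomSum (n : Nat) :
    ((List.range n).map (fun j => (2 : Int) ^ j)).sum = 2 ^ n - 1 := by
  induction n with
  | zero => simp
  | succ n ih => rw [List.range_succ]; simp [ih]; ring

-- the table A builds: after the loop has run with number = m + 2, ans = 0 :: [2^0, 2^1, …, 2^(m+1)]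
theorem pvTable (m : Nat) :
    (PySem.List.pyRange 3 ((m : Int) + 3) 1).foldl btjumpFloorStep [0, 1, 2]
      = 0 :: (List.range (m + 2)).map (fun j => (2 : Int) ^ j) := by
  induction m with
  | zero => decide
  | succ m ih =>
    have hcast : ((m + 1 : Nat) : Int) + 3 = ((m : Int) + 3) + 1 := by push_cast; ring
    rw [hcast, PySem.List.pyRange_one_succ_right (by omega), List.foldl_append, ih]
    show btjumpFloorStep _ _ = _
    have hlen : (m : Int) + 3
        = ((0 :: (List.range (m + 2)).map (fun j => (2 : Int) ^ j)).length : Int) := by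
      simp; omega
    unfold btjumpFloorStep
    rw [hlen, PySem.List.foldl_pyRange_pyGetD'
      (0 :: (List.range (m + 2)).map (fun j => (2 : Int) ^ j)) 0 (fun a b => a + b) 1 (by omega)]
    have hdrop : ((0 :: (List.range (m + 2)).map (fun j => (2 : Int) ^ j)).drop (1 : Int).toNat)
        = (List.range (m + 2)).map (fun j => (2 : Int) ^ j) := by simp
    rw [hdrop]
    have hfold : List.foldl (fun a b : Int => a + b) 1
        ((List.range (m + 2)).map (fun j => (2 : Int) ^ j))
        = 1 + ((List.range (m + 2)).map (fun j => (2 : Int) ^ j)).sum := by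
      simpa using PySem.List.foldl_add
        (l := (List.range (m + 2)).map (fun j => (2 : Int) ^ j)) (a := 1) (g := id)
    rw [hfold]
    simp [pvGeomSum, List.range_succ]
    ring

-- A equals B on all non-negative inputs
theorem pvMain : ∀ (number : Int), 0 ≤ number → btjumpFloor number = btjumpFloor_alt number := by
  intro number h
  obtain ⟨n, rfl⟩ := Int.eq_ofNat_of_zero_le h
  match n with
  | 0 => decide
  | 1 => decide
  | 2 => decide
  | (m + 3) =>
    have hc : ((m + 3 : Nat) : Int) + 1 = ((m + 1 : Nat) : Int) + 3 := by push_cast; ring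
    show PySem.List.pyGetD ((PySem.List.pyRange 3 (((m + 3 : Nat) : Int) + 1) 1).foldl
        btjumpFloorStep [0, 1, 2]) ((m + 3 : Nat) : Int) 0 = _
    rw [hc, pvTable (m + 1)]
    have hget : PySem.List.pyGetD
        (0 :: (List.range (m + 3)).map (fun j => (2 : Int) ^ j)) ((m + 3 : Nat) : Int) 0
        = 2 ^ (m + 2) := by
      rw [PySem.List.pyGetD_natCast]
      simp [List.getD]
    rw [hget]
    unfold btjumpFloor_alt
    rw [if_neg (by positivity)]
    congr 1
    omega

-- ===== VERDICT (by name: the statement is the Claim_ definition above) =====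
theorem btjumpFloor_spec : Claim_equal_btjumpFloor :=
  fun number _ h => pvMain number h
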